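-- pv_equiv track=rewrite | github.com/isayaksh/Algorithm | BaekJoon/18243.py | solution
-- ===== SOURCE A (Python) =====
-- def solution(N, K, edges):
--     # init graph
--     graph = [[0] * (N+1) for _ in range(N+1)]
--     for n1, n2 in edges:
--         graph[n1][n2] = 1
--         graph[n2][n1] = 1
--
--     # floyd warshall
--     for i in range(1,N+1):
--         for j in range(1,N+1):
--             for k in range(1,N+1):
--                 if (graph[j][k] == 0 or graph[j][k] > graph[j][i] + graph[i][k]) and (graph[j][i] != 0 and graph[i][k] != 0):
--                     graph[j][k] = graph[j][i] + graph[i][k]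
--
--     for y in range(1, N+1):
--         for x in range(y+1, N+1):
--             if not graph[y][x] or graph[y][x] > 6:
--                 return "Big World!"
--     return "Small World!"
-- ===== SOURCE B (Python) =====
-- def solution(N, K, edges):
--     # BFS (depth-limited to 6) from each vertex instead of Floyd-Warshall.
--     adj = [[] for _ in range(N + 1)]
--     for a, b in edges:
--         adj[a].append(b)
--         adj[b].append(a)
--     for s in range(1, N + 1):
--         seen = [False] * (N + 1)
--         seen[0] = True  # vertex 0 is not a valid vertex; never traverse it
--         seen[s] = True
--         frontier = [s]
--         for _ in range(6):
--             nxt = []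
--             for v in frontier:
--                 for w in adj[v]:
--                     if not seen[w]:
--                         seen[w] = True
--                         nxt.append(w)
--             frontier = nxt
--         for t in range(s + 1, N + 1):
--             if not seen[t]:
--                 return "Big World!"
--     return "Small World!"
-- ===== Notes on version B (the rewrite author's own statement) =====
-- stated objective: faster
-- what changed: Replaces the O(N^3) Floyd-Warshall all-pairs pass by a depth-limited (6 levels) BFS from each vertex over adjacency lists, checking directly whether every later vertex is reached within 6 steps.
import Mathlib
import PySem

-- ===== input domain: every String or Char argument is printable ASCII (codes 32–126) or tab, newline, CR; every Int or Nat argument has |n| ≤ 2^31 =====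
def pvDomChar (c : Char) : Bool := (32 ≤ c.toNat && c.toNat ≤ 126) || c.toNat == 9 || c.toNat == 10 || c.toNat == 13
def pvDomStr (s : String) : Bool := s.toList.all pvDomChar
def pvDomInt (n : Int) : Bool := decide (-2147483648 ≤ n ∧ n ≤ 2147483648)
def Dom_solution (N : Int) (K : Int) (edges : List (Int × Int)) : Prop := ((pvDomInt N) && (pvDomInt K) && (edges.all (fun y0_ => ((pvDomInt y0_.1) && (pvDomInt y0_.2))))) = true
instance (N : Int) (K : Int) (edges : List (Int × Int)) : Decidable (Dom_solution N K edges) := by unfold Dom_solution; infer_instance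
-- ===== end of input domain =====

-- B replaces A's O(N^3) Floyd-Warshall by a depth-limited (6-level) BFS from each vertex over
-- adjacency lists; same return value on every input where A does not raise.

-- ===== PORT A =====
-- effective slot of Python's list[i] for a possibly negative index (exact where Python does not raise)
def pvNormIdx (len : Nat) (i : Int) : Nat := (if i < 0 then i + len else i).toNat

-- row[j] = v  (exact where Python does not raise IndexError; Pre_ guarantees that)
def pvLset (row : List Int) (j v : Int) : List Int := PySem.List.pySetD row j v

-- graph[i][j] = v
def pvMset (g : List (List Int)) (i j v : Int) : List (List Int) :=
  let ii := pvNormIdx g.length i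
  g.set ii (pvLset (g.getD ii []) j v)

-- graph[i][j]  (exact where Python does not raise; A only reads in-range indices)
def pvMget (g : List (List Int)) (i j : Int) : Int :=
  match PySem.List.pyGet? g i with
  | some row => (PySem.List.pyGet? row j).getD 0
  | none => 0

def solution (N : Int) (K : Int) (edges : List (Int × Int)) : String :=
  let n := (N + 1).toNat
  let g0 : List (List Int) := List.replicate n (List.replicate n 0)
  let g1 := edges.foldl (fun g p => pvMset (pvMset g p.1 p.2 1) p.2 p.1 1) g0
  let g2 := (PySem.List.pyRange 1 (N+1) 1).foldl (fun g i =>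
      (PySem.List.pyRange 1 (N+1) 1).foldl (fun g j =>
        (PySem.List.pyRange 1 (N+1) 1).foldl (fun g k =>
          if ((pvMget g j k == 0 || decide (pvMget g j k > pvMget g j i + pvMget g i k))
              && (pvMget g j i != 0 && pvMget g i k != 0))
          then pvMset g j k (pvMget g j i + pvMget g i k) else g) g) g) g1
  if (PySem.List.pyRange 1 (N+1) 1).any (fun y =>
       (PySem.List.pyRange (y+1) (N+1) 1).any (fun x =>
         pvMget g2 y x == 0 || decide (pvMget g2 y x > 6)))
  then "Big World!" else "Small World!"

-- ===== PORT B =====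
-- seen[i]  (exact where Python does not raise)
def pvBget (seen : List Bool) (i : Int) : Bool :=
  (PySem.List.pyGet? seen i).getD false

-- seen[i] = True
def pvBset (seen : List Bool) (i : Int) : List Bool := PySem.List.pySetD seen i true

-- adj[i]  (exact where Python does not raise)
def pvRowAt (adj : List (List Int)) (i : Int) : List Int :=
  (PySem.List.pyGet? adj i).getD []

-- adj[i].append(w)
def pvAppendAt (adj : List (List Int)) (i w : Int) : List (List Int) :=
  let ii := pvNormIdx adj.length i
  adj.set ii (adj.getD ii [] ++ [w])

-- one BFS level: mark unseen neighbours of the frontier, collect them as the next frontier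
def pvBfsRound (adj : List (List Int)) (seen : List Bool) (frontier : List Int) :
    List Bool × List Int :=
  frontier.foldl (fun st v =>
    (pvRowAt adj v).foldl (fun st w =>
      if pvBget st.1 w then st else (pvBset st.1 w, st.2 ++ [w])) st) (seen, [])

-- for _ in range(6): one level per iteration
def pvBfsRounds : Nat → List (List Int) → List Bool → List Int → List Bool
  | 0, _, seen, _ => seen
  | r + 1, adj, seen, frontier =>
      let st := pvBfsRound adj seen frontier
      pvBfsRounds r adj st.1 st.2

def solution_alt (N : Int) (K : Int) (edges : List (Int × Int)) : String :=
  let n := (N + 1).toNat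
  let adj := edges.foldl (fun ad p => pvAppendAt (pvAppendAt ad p.1 p.2) p.2 p.1)
               (List.replicate n ([] : List Int))
  if (PySem.List.pyRange 1 (N+1) 1).any (fun s =>
      let seen0 := pvBset (pvBset (List.replicate n false) 0) s
      let seen := pvBfsRounds 6 adj seen0 [s]
      (PySem.List.pyRange (s+1) (N+1) 1).any (fun t => !(pvBget seen t)))
  then "Big World!" else "Small World!"

-- ===== PRECONDITION & SPEC =====
-- Pre_ excludes exactly the inputs on which A raises IndexError: an edge endpoint above N or
-- below -(N+1) (outside Python's index range for the (N+1)-row matrix).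
def Pre_solution (N : Int) (K : Int) (edges : List (Int × Int)) : Prop :=
  ∀ p ∈ edges, -(N+1) ≤ p.1 ∧ p.1 ≤ N ∧ -(N+1) ≤ p.2 ∧ p.2 ≤ N

instance (N : Int) (K : Int) (edges : List (Int × Int)) : Decidable (Pre_solution N K edges) := by
  unfold Pre_solution; infer_instance

def pvWitness_solution : Int × Int × (List (Int × Int)) := (3, 2, [(1, 2), (2, 3)])

def Spec_solution (N : Int) (K : Int) (edges : List (Int × Int)) (out : String) : Prop :=
  out = solution_alt N K edges
instance (N : Int) (K : Int) (edges : List (Int × Int)) (out : String) :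
    Decidable (Spec_solution N K edges out) := by unfold Spec_solution; infer_instance

-- ===== CLAIM (what is proved, stated in full; the proofs are below) =====
def Claim_equal_solution : Prop := ∀ (N : Int) (K : Int) (edges : List (Int × Int)),
  Dom_solution N K edges → Pre_solution N K edges → Spec_solution N K edges (solution N K edges)

-- ===== LEMMAS AND PROOFS =====

theorem pvIdx_eq {n : Nat} {i : Int} (h0 : -(n : Int) ≤ i) (h1 : i < (n : Int)) :
    PySem.List.pyIdx? n i = some (pvNormIdx n i) := by
  unfold PySem.List.pyIdx? pvNormIdx
  split_ifs with a b c <;> try omega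
  · congr 1
  · congr 1; omega

theorem pvNormIdx_lt {n : Nat} {i : Int} (h0 : -(n : Int) ≤ i) (h1 : i < (n : Int)) (hn : 0 < n) :
    pvNormIdx n i < n := by
  unfold pvNormIdx; split <;> omega

theorem pvGet_eq {α : Type} {xs : List α} {n : Nat} (hlen : xs.length = n) {i : Int}
    (h0 : -(n : Int) ≤ i) (h1 : i < (n : Int)) (d : α) :
    PySem.List.pyGet? xs i = some (xs.getD (pvNormIdx n i) d) := by
  unfold PySem.List.pyGet?
  rw [hlen, pvIdx_eq h0 h1]
  have hlt : pvNormIdx n i < n := pvNormIdx_lt h0 h1 (by omega)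
  simp [Option.bind, List.getElem?_eq_getElem (by omega : pvNormIdx n i < xs.length),
    List.getD, List.getElem?_eq_getElem]

theorem pvSetD_eq {α : Type} {xs : List α} {n : Nat} (hlen : xs.length = n) {i : Int}
    (h0 : -(n : Int) ≤ i) (h1 : i < (n : Int)) (v : α) :
    PySem.List.pySetD xs i v = xs.set (pvNormIdx n i) v := by
  unfold PySem.List.pySetD PySem.List.pySet?
  rw [hlen, pvIdx_eq h0 h1]
  rfl

def pvRep (n : Nat) (g : List (List Int)) (M : Nat → Nat → Int) : Prop :=
  g.length = n ∧ ∀ j < n, (g.getD j []).length = n ∧ ∀ k < n, (g.getD j []).getD k 0 = M j k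

theorem pvMget_eq {n g M} (h : pvRep n g M) {i j : Int}
    (hi0 : -(n:Int) ≤ i) (hin : i < (n : Int)) (hj0 : -(n:Int) ≤ j) (hjn : j < (n : Int)) :
    pvMget g i j = M (pvNormIdx n i) (pvNormIdx n j) := by
  obtain ⟨hlen, hrows⟩ := h
  have hilt := pvNormIdx_lt hi0 hin (by omega)
  have hjlt := pvNormIdx_lt hj0 hjn (by omega)
  obtain ⟨hrlen, hrentries⟩ := hrows _ hilt
  unfold pvMget
  rw [pvGet_eq hlen hi0 hin []]
  show (PySem.List.pyGet? (g.getD (pvNormIdx n i) []) j).getD 0 = _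
  rw [pvGet_eq hrlen hj0 hjn 0]
  simp only [Option.getD_some]
  exact hrentries _ hjlt

theorem getD_set_self {α : Type} (xs : List α) (k : Nat) (v d : α) (h : k < xs.length) :
    (xs.set k v).getD k d = v := by
  simp [List.getD, List.getElem?_set_self, h]

theorem getD_set_ne {α : Type} (xs : List α) (k k' : Nat) (v d : α) (h : k ≠ k') :
    (xs.set k v).getD k' d = xs.getD k' d := by
  simp [List.getD, List.getElem?_set_ne h]

theorem pvRep_mset {n g M} (h : pvRep n g M) {i j : Int} (v : Int)
    (hi0 : -(n : Int) ≤ i) (hin : i < (n : Int)) (hj0 : -(n : Int) ≤ j) (hjn : j < (n : Int)) :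
    pvRep n (pvMset g i j v)
      (fun x y => if x = pvNormIdx n i ∧ y = pvNormIdx n j then v else M x y) := by
  obtain ⟨hlen, hrows⟩ := h
  have hilt := pvNormIdx_lt hi0 hin (by omega)
  have hjlt := pvNormIdx_lt hj0 hjn (by omega)
  unfold pvMset pvLset
  rw [hlen]
  constructor
  · simp [hlen]
  · intro x hx
    by_cases hxe : x = pvNormIdx n i
    · subst hxe
      rw [getD_set_self _ _ _ _ (by omega)]
      rw [pvSetD_eq (hrows _ hilt).1 hj0 hjn]
      refine ⟨by simpa [List.getD] using (hrows _ hilt).1, ?_⟩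
      intro y hy
      by_cases hye : y = pvNormIdx n j
      · subst hye
        rw [getD_set_self _ _ _ _ (by rw [(hrows _ hilt).1]; omega)]
        simp
      · rw [getD_set_ne _ _ _ _ _ (fun hh => hye hh.symm)]
        rw [(hrows _ hilt).2 y hy]
        simp [hye]
    · rw [getD_set_ne _ _ _ _ _ (fun hh => hxe hh.symm)]
      refine ⟨(hrows _ hx).1, ?_⟩
      intro y hy
      rw [(hrows _ hx).2 y hy]
      simp [hxe]

def pvE (n : Nat) (l : List (Int × Int)) (u v : Nat) : Prop :=
  ∃ p ∈ l, (pvNormIdx n p.1 = u ∧ pvNormIdx n p.2 = v) ∨ (pvNormIdx n p.2 = u ∧ pvNormIdx n p.1 = v)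


def pvE_dec (n : Nat) (l : List (Int × Int)) (u v : Nat) : Decidable (pvE n l u v) := by
  unfold pvE; infer_instance

theorem pvE_append_single {n : Nat} {l : List (Int × Int)} {p : Int × Int} {x y : Nat} :
    pvE n (l ++ [p]) x y ↔ pvE n l x y ∨
      (pvNormIdx n p.1 = x ∧ pvNormIdx n p.2 = y) ∨ (pvNormIdx n p.2 = x ∧ pvNormIdx n p.1 = y) := by
  unfold pvE
  simp only [List.mem_append, List.mem_singleton]
  constructor
  · rintro ⟨q, (hq | rfl), hcase⟩
    · exact Or.inl ⟨q, hq, hcase⟩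
    · tauto
  · rintro (⟨q, hq, hcase⟩ | ⟨a, b⟩ | ⟨a, b⟩)
    · exact ⟨q, Or.inl hq, hcase⟩
    · exact ⟨p, Or.inr rfl, Or.inl ⟨a, b⟩⟩
    · exact ⟨p, Or.inr rfl, Or.inr ⟨a, b⟩⟩

theorem pvRep_congr {n g M M'} (h : pvRep n g M)
    (he : ∀ x < n, ∀ y < n, M x y = M' x y) : pvRep n g M' := by
  refine ⟨h.1, fun j hj => ⟨(h.2 j hj).1, fun k hk => ?_⟩⟩
  rw [(h.2 j hj).2 k hk]; exact he j hj k hk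

theorem pvIteCongr {c d : Prop} {ic : Decidable c} {id' : Decidable d} (h : c ↔ d) :
    (@ite Int c ic 1 0) = @ite Int d id' 1 0 := by
  by_cases hc : c
  · rw [if_pos hc, if_pos (h.mp hc)]
  · rw [if_neg hc, if_neg (fun hd' => hc (h.mpr hd'))]

theorem pvRep_init_aux {n : Nat} (todo : List (Int × Int)) (done : List (Int × Int))
    (g : List (List Int))
    (hpre : ∀ p ∈ todo, -(n : Int) ≤ p.1 ∧ p.1 < n ∧ -(n : Int) ≤ p.2 ∧ p.2 < n)
    (h : pvRep n g (fun x y => @ite Int (pvE n done x y) (pvE_dec n done x y) 1 0)) :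
    pvRep n (todo.foldl (fun g p => pvMset (pvMset g p.1 p.2 1) p.2 p.1 1) g)
      (fun x y => @ite Int (pvE n (done ++ todo) x y) (pvE_dec n (done ++ todo) x y) 1 0) := by
  induction todo generalizing done g with
  | nil =>
      simp only [List.foldl_nil]
      refine pvRep_congr h (fun x hx y hy => ?_)
      refine pvIteCongr ?_
      rw [List.append_nil]
  | cons p todo ih =>
      obtain ⟨h1, h2, h3, h4⟩ := hpre p (by simp)
      have step1 := pvRep_mset h 1 h1 h2 h3 h4
      have step2 := pvRep_mset step1 1 h3 h4 h1 h2
      have step3 := pvRep_congr (M' := fun x y => @ite Int (pvE n (done ++ [p]) x y) (pvE_dec n (done ++ [p]) x y) 1 0)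
        step2 (fun x hx y hy => by
          by_cases c1 : x = pvNormIdx n p.2 ∧ y = pvNormIdx n p.1 <;>
          by_cases c2 : x = pvNormIdx n p.1 ∧ y = pvNormIdx n p.2 <;>
          by_cases hd : pvE n done x y <;>
          simp [c1, c2, hd, pvE_append_single] <;> tauto)
      have hrec := ih (done ++ [p]) _ (fun q hq => hpre q (by simp [hq])) step3
      simp only [List.foldl_cons]
      refine pvRep_congr hrec (fun x hx y hy => ?_)
      refine pvIteCongr ?_
      rw [List.append_assoc, List.singleton_append]

theorem pvRep_init {n : Nat} (edges : List (Int × Int))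
    (hpre : ∀ p ∈ edges, -(n : Int) ≤ p.1 ∧ p.1 < n ∧ -(n : Int) ≤ p.2 ∧ p.2 < n) :
    pvRep n (edges.foldl (fun g p => pvMset (pvMset g p.1 p.2 1) p.2 p.1 1)
              (List.replicate n (List.replicate n 0)))
      (fun x y => @ite Int (pvE n edges x y) (pvE_dec n edges x y) 1 0) := by
  have base : pvRep n (List.replicate n (List.replicate n 0))
      (fun x y => @ite Int (pvE n ([] : List (Int × Int)) x y) (pvE_dec n [] x y) 1 0) := by
    refine ⟨by simp, fun j hj => ⟨?_, fun k hk => ?_⟩⟩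
    · simp [List.getD, List.getElem?_replicate, hj]
    · simp [List.getD, List.getElem?_replicate, hj, hk, pvE]
  simpa using pvRep_init_aux edges [] _ hpre base

inductive pvW (E : Nat → Nat → Prop) (i : Nat) : Nat → Nat → Nat → Prop
  | single {u v : Nat} : E u v → pvW E i 1 u v
  | cons {u m v : Nat} {L : Nat} : E u m → 1 ≤ m → m ≤ i → pvW E i L m v → pvW E i (L + 1) u v

theorem pvW_pos {E : Nat → Nat → Prop} {i L u v : Nat} (h : pvW E i L u v) : 1 ≤ L := by
  cases h <;> omega

theorem pvW_mono {E : Nat → Nat → Prop} {i i' L u v : Nat} (h : pvW E i L u v) (hle : i ≤ i') :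
    pvW E i' L u v := by
  induction h with
  | single he => exact pvW.single he
  | cons he h1 h2 _ ih => exact pvW.cons he h1 (le_trans h2 hle) ih

theorem pvW_append {E : Nat → Nat → Prop} {i L1 L2 u m v : Nat}
    (h1 : pvW E i L1 u m) (h2 : pvW E i L2 m v) (hm1 : 1 ≤ m) (hmi : m ≤ i) :
    pvW E i (L1 + L2) u v := by
  induction h1 with
  | single he =>
      have h := pvW.cons he hm1 hmi h2
      rwa [Nat.add_comm]
  | cons he ha hb hw ih =>
      have h := pvW.cons he ha hb (ih h2 hm1 hmi)
      have e : ∀ a : Nat, a + L2 + 1 = a + 1 + L2 := fun a => by omega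
      rwa [e] at h


theorem pvW_snoc {E : Nat → Nat → Prop} {i L u m v : Nat}
    (h1 : pvW E i L u m) (he : E m v) (hm1 : 1 ≤ m) (hmi : m ≤ i) :
    pvW E i (L + 1) u v :=
  pvW_append h1 (pvW.single he) hm1 hmi

theorem pvW_last {E : Nat → Nat → Prop} {i L u v : Nat} (h : pvW E i (L + 1) u v) (hL : 1 ≤ L) :
    ∃ m, 1 ≤ m ∧ m ≤ i ∧ pvW E i L u m ∧ E m v := by
  induction L generalizing u with
  | zero => omega
  | succ L ih =>
      cases h with
      | cons he h1 h2 hw =>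
          rename_i m
          by_cases hL0 : 1 ≤ L
          · obtain ⟨m', a1, a2, a3, a4⟩ := ih hw hL0
            exact ⟨m', a1, a2, pvW.cons he h1 h2 a3, a4⟩
          · have hL0' : L = 0 := by omega
            subst hL0'
            cases hw with
            | single he2 => exact ⟨m, h1, h2, pvW.single he, he2⟩
            | cons _ _ _ hw2 => exact absurd (pvW_pos hw2) (by omega)

theorem pvW_drop {E : Nat → Nat → Prop} {i L u v : Nat} (h : pvW E (i + 1) L u v) :
    (∃ L' ≤ L, pvW E i L' u v) ∨
    (∃ L1 L2, L1 + L2 ≤ L ∧ pvW E i L1 u (i + 1) ∧ pvW E i L2 (i + 1) v) := by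
  induction h with
  | single he => exact Or.inl ⟨1, le_refl 1, pvW.single he⟩
  | cons he h1 h2 hw ih =>
      rename_i u' m' v' L'
      by_cases hm : m' = i + 1
      · subst hm
        rcases ih with ⟨L2, hle, hw2⟩ | ⟨L1, L2, hle, hw1, hw2⟩
        · exact Or.inr ⟨1, L2, by omega, pvW.single he, hw2⟩
        · exact Or.inr ⟨1, L2, by omega, pvW.single he, hw2⟩
      · have hmi : m' ≤ i := by omega
        rcases ih with ⟨L2, hle, hw2⟩ | ⟨L1, L2, hle, hw1, hw2⟩
        · exact Or.inl ⟨L2 + 1, by omega, pvW.cons he h1 hmi hw2⟩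
        · exact Or.inr ⟨L1 + 1, L2, by omega, pvW.cons he h1 hmi hw1, hw2⟩

theorem pvW_zero {E : Nat → Nat → Prop} {L u v : Nat} (h : pvW E 0 L u v) : E u v ∧ L = 1 := by
  cases h with
  | single he => exact ⟨he, rfl⟩
  | cons he h1 h2 hw => omega

def pvDok (n : Nat) (E : Nat → Nat → Prop) (i : Nat) (M : Nat → Nat → Int) : Prop :=
  ∀ x y, 1 ≤ x → x < n → 1 ≤ y → y < n →
    (M x y = 0 ∧ ∀ L, ¬ pvW E i L x y) ∨
    (∃ L : Nat, M x y = (L : Int) ∧ 1 ≤ L ∧ pvW E i L x y ∧ ∀ L', pvW E i L' x y → L ≤ L')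

def pvF (i : Nat) (M : Nat → Nat → Int) (x y : Nat) : Int :=
  if (M x y = 0 ∨ M x i + M i y < M x y) ∧ M x i ≠ 0 ∧ M i y ≠ 0 then M x i + M i y else M x y

theorem pvDok_base {n : Nat} (E : Nat → Nat → Prop) [∀ u v, Decidable (E u v)] :
    pvDok n E 0 (fun x y => if E x y then 1 else 0) := by
  intro x y hx1 hxn hy1 hyn
  by_cases he : E x y
  · exact Or.inr ⟨1, by simp [he], le_refl 1, pvW.single he, fun L' hL' => pvW_pos hL'⟩
  · refine Or.inl ⟨by simp [he], fun L hL => he (pvW_zero hL).1⟩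

theorem pvDok_step {n : Nat} {E : Nat → Nat → Prop} {i : Nat} {M : Nat → Nat → Int}
    (h : pvDok n E i M) (hin : i + 1 < n) :
    pvDok n E (i + 1) (fun x y =>
      if 1 ≤ x ∧ x < n ∧ 1 ≤ y ∧ y < n then pvF (i + 1) M x y else M x y) := by
  intro x y hx1 hxn hy1 hyn
  simp only [hx1, hxn, hy1, hyn, and_self, if_pos, true_and]
  set p := i + 1 with hp
  have hxy := h x y hx1 hxn hy1 hyn
  have hxp := h x p hx1 hxn (by omega) hin
  have hpy := h p y (by omega) hin hy1 hyn
  -- join two legs through the pivot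
  have join : ∀ {L1 L2 : Nat}, pvW E i L1 x p → pvW E i L2 p y → pvW E p (L1 + L2) x y :=
    fun h1 h2 => pvW_append (pvW_mono h1 (by omega)) (pvW_mono h2 (by omega)) (by omega) (by omega)
  rcases hxp with ⟨b0, hbw⟩ | ⟨Lb, hb, hb1, hbw, hbmin⟩
  · -- no x→p leg: value unchanged
    have hcond : ¬ ((M x y = 0 ∨ M x p + M p y < M x y) ∧ M x p ≠ 0 ∧ M p y ≠ 0) := by
      intro hc; exact hc.2.1 b0
    unfold pvF
    rw [if_neg hcond]
    rcases hxy with ⟨a0, haw⟩ | ⟨La, ha, ha1, haw, hamin⟩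
    · refine Or.inl ⟨a0, fun L hL => ?_⟩
      rcases pvW_drop hL with ⟨L', _, hw⟩ | ⟨L1, L2, _, hw1, hw2⟩
      · exact haw L' hw
      · exact hbw L1 hw1
    · refine Or.inr ⟨La, ha, ha1, pvW_mono haw (by omega), fun L' hL' => ?_⟩
      rcases pvW_drop hL' with ⟨L'', hle, hw⟩ | ⟨L1, L2, _, hw1, hw2⟩
      · exact le_trans (hamin L'' hw) hle
      · exact absurd hw1 (hbw L1)
  rcases hpy with ⟨c0, hcw⟩ | ⟨Lc, hc, hc1, hcw, hcmin⟩
  · -- no p→y leg: value unchanged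
    have hcond : ¬ ((M x y = 0 ∨ M x p + M p y < M x y) ∧ M x p ≠ 0 ∧ M p y ≠ 0) := by
      intro hcnd; exact hcnd.2.2 c0
    unfold pvF
    rw [if_neg hcond]
    rcases hxy with ⟨a0, haw⟩ | ⟨La, ha, ha1, haw, hamin⟩
    · refine Or.inl ⟨a0, fun L hL => ?_⟩
      rcases pvW_drop hL with ⟨L', _, hw⟩ | ⟨L1, L2, _, hw1, hw2⟩
      · exact haw L' hw
      · exact hcw L2 hw2
    · refine Or.inr ⟨La, ha, ha1, pvW_mono haw (by omega), fun L' hL' => ?_⟩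
      rcases pvW_drop hL' with ⟨L'', hle, hw⟩ | ⟨L1, L2, _, hw1, hw2⟩
      · exact le_trans (hamin L'' hw) hle
      · exact absurd hw2 (hcw L2)
  · -- both legs exist
    rcases hxy with ⟨a0, haw⟩ | ⟨La, ha, ha1, haw, hamin⟩
    · have hcond : (M x y = 0 ∨ M x p + M p y < M x y) ∧ M x p ≠ 0 ∧ M p y ≠ 0 := by
        refine ⟨Or.inl a0, by rw [hb]; exact_mod_cast (by omega), by rw [hc]; exact_mod_cast (by omega)⟩
      unfold pvF
      rw [if_pos hcond]
      refine Or.inr ⟨Lb + Lc, by rw [hb, hc]; push_cast; ring, by omega, join hbw hcw,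
        fun L' hL' => ?_⟩
      rcases pvW_drop hL' with ⟨L'', _, hw⟩ | ⟨L1, L2, hle, hw1, hw2⟩
      · exact absurd hw (haw L'')
      · have := hbmin L1 hw1; have := hcmin L2 hw2; omega
    · by_cases hlt : Lb + Lc < La
      · have hcond : (M x y = 0 ∨ M x p + M p y < M x y) ∧ M x p ≠ 0 ∧ M p y ≠ 0 := by
          refine ⟨Or.inr ?_, by rw [hb]; exact_mod_cast (by omega), by rw [hc]; exact_mod_cast (by omega)⟩
          rw [ha, hb, hc]; exact_mod_cast hlt
        unfold pvF
        rw [if_pos hcond]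
        refine Or.inr ⟨Lb + Lc, by rw [hb, hc]; push_cast; ring, by omega, join hbw hcw,
          fun L' hL' => ?_⟩
        rcases pvW_drop hL' with ⟨L'', hle, hw⟩ | ⟨L1, L2, hle, hw1, hw2⟩
        · have := hamin L'' hw; omega
        · have := hbmin L1 hw1; have := hcmin L2 hw2; omega
      · have hcond : ¬ ((M x y = 0 ∨ M x p + M p y < M x y) ∧ M x p ≠ 0 ∧ M p y ≠ 0) := by
          rintro ⟨h1 | h1, h2, h3⟩
          · rw [ha] at h1; exact absurd h1 (by exact_mod_cast (by omega))
          · rw [ha, hb, hc] at h1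
            have : Lb + Lc < La := by exact_mod_cast h1
            omega
        unfold pvF
        rw [if_neg hcond]
        refine Or.inr ⟨La, ha, ha1, pvW_mono haw (by omega), fun L' hL' => ?_⟩
        rcases pvW_drop hL' with ⟨L'', hle, hw⟩ | ⟨L1, L2, hle, hw1, hw2⟩
        · exact le_trans (hamin L'' hw) hle
        · have := hbmin L1 hw1; have := hcmin L2 hw2; omega

def pvMid (n i : Nat) (M : Nat → Nat → Int) (j k : Nat) (x y : Nat) : Int :=
  if 1 ≤ x ∧ x < n ∧ 1 ≤ y ∧ y < n ∧ (x < j ∨ (x = j ∧ y < k)) then pvF i M x y else M x y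

theorem pvF_col {i : Nat} {M : Nat → Nat → Int} {x : Nat} (h0 : 0 ≤ M i i) : pvF i M x i = M x i := by
  unfold pvF; split
  · rename_i hc; exfalso; rcases hc with ⟨h1 | h1, h2, h3⟩ <;> omega
  · rfl

theorem pvF_row {i : Nat} {M : Nat → Nat → Int} {y : Nat} (h0 : 0 ≤ M i i) : pvF i M i y = M i y := by
  unfold pvF; split
  · rename_i hc; exfalso; rcases hc with ⟨h1 | h1, h2, h3⟩ <;> omega
  · rfl

theorem pvMid_col {n i : Nat} {M : Nat → Nat → Int} {j k x : Nat} (h0 : 0 ≤ M i i) :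
    pvMid n i M j k x i = M x i := by
  unfold pvMid; split
  · exact pvF_col h0
  · rfl

theorem pvMid_row {n i : Nat} {M : Nat → Nat → Int} {j k y : Nat} (h0 : 0 ≤ M i i) :
    pvMid n i M j k i y = M i y := by
  unfold pvMid; split
  · exact pvF_row h0
  · rfl

theorem pvMid_unprocessed {n i : Nat} {M : Nat → Nat → Int} {j k : Nat} :
    pvMid n i M j k j k = M j k := by
  unfold pvMid; split
  · omega
  · rfl

theorem pvNormIdx_of_nonneg {n : Nat} {i : Int} (h : 0 ≤ i) : pvNormIdx n i = i.toNat := by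
  unfold pvNormIdx; split <;> [omega; rfl]

theorem pvInner {N : Int} {n : Nat} (hn : (n : Int) = N + 1) {i j : Int} {M : Nat → Nat → Int}
    (hi1 : 1 ≤ i) (hin : i < (n : Int)) (hj1 : 1 ≤ j) (hjn : j < (n : Int))
    (hdiag : 0 ≤ M i.toNat i.toNat) :
    ∀ (fuel : Nat) (k0 : Int), (N + 1 - k0).toNat = fuel → 1 ≤ k0 → k0 ≤ N + 1 →
    ∀ g, pvRep n g (pvMid n i.toNat M j.toNat k0.toNat) →
    pvRep n ((PySem.List.pyRange k0 (N+1) 1).foldl (fun g k =>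
        if ((pvMget g j k == 0 || decide (pvMget g j k > pvMget g j i + pvMget g i k))
            && (pvMget g j i != 0 && pvMget g i k != 0))
        then pvMset g j k (pvMget g j i + pvMget g i k) else g) g)
      (pvMid n i.toNat M j.toNat n) := by
  intro fuel
  induction fuel with
  | zero =>
      intro k0 hfuel hk1 hkN g hg
      have hk : k0 = N + 1 := by omega
      subst hk
      rw [PySem.List.pyRange_one_eq_nil (by omega)]
      simp only [List.foldl_nil]
      have : (N + 1).toNat = n := by omega
      rwa [this] at hg
  | succ fuel ih =>
      intro k0 hfuel hk1 hkN g hg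
      have hklt : k0 < N + 1 := by omega
      rw [PySem.List.pyRange_one_cons hklt]
      simp only [List.foldl_cons]
      have hk0n : k0 < (n : Int) := by omega
      -- the three reads
      have ha : pvMget g j k0 = M j.toNat k0.toNat := by
        rw [pvMget_eq hg (by omega) hjn (by omega) hk0n,
          pvNormIdx_of_nonneg (by omega), pvNormIdx_of_nonneg (by omega)]
        exact pvMid_unprocessed
      have hb : pvMget g j i = M j.toNat i.toNat := by
        rw [pvMget_eq hg (by omega) hjn (by omega) hin,
          pvNormIdx_of_nonneg (by omega), pvNormIdx_of_nonneg (by omega)]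
        exact pvMid_col hdiag
      have hc : pvMget g i k0 = M i.toNat k0.toNat := by
        rw [pvMget_eq hg (by omega) hin (by omega) hk0n,
          pvNormIdx_of_nonneg (by omega), pvNormIdx_of_nonneg (by omega)]
        exact pvMid_row hdiag
      have hsq : 1 ≤ j.toNat ∧ j.toNat < n ∧ 1 ≤ k0.toNat ∧ k0.toNat < n := by omega
      have hnext : ∀ g', pvRep n g' (pvMid n i.toNat M j.toNat (k0.toNat + 1)) →
          pvRep n ((PySem.List.pyRange (k0+1) (N+1) 1).foldl _ g') (pvMid n i.toNat M j.toNat n) :=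
        fun g' hg' => ih (k0 + 1) (by omega) (by omega) (by omega) g' (by
          have : (k0 + 1).toNat = k0.toNat + 1 := by omega
          rwa [this])
      by_cases hcond : (M j.toNat k0.toNat = 0 ∨ M j.toNat i.toNat + M i.toNat k0.toNat < M j.toNat k0.toNat)
          ∧ M j.toNat i.toNat ≠ 0 ∧ M i.toNat k0.toNat ≠ 0
      · rw [if_pos (by
          rw [ha, hb, hc]
          simp only [Bool.and_eq_true, Bool.or_eq_true, beq_iff_eq, decide_eq_true_eq,
            bne_iff_ne, ne_eq]
          constructor
          · rcases hcond.1 with h | h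
            · exact Or.inl h
            · exact Or.inr (by omega)
          · exact ⟨hcond.2.1, hcond.2.2⟩)]
        apply hnext
        have hset := pvRep_mset hg (pvMget g j i + pvMget g i k0) (by omega) hjn (by omega) hk0n
        refine pvRep_congr hset (fun x hx y hy => ?_)
        rw [pvNormIdx_of_nonneg (i := j) (by omega), pvNormIdx_of_nonneg (i := k0) (by omega)]
        by_cases hxy : x = j.toNat ∧ y = k0.toNat
        · rw [if_pos hxy, hb, hc]
          obtain ⟨rfl, rfl⟩ := hxy
          unfold pvMid
          rw [if_pos ⟨hsq.1, hsq.2.1, hsq.2.2.1, hsq.2.2.2, Or.inr ⟨rfl, by omega⟩⟩]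
          unfold pvF
          rw [if_pos hcond]
        · rw [if_neg hxy]
          unfold pvMid
          have : (x < j.toNat ∨ (x = j.toNat ∧ y < k0.toNat)) ↔
              (x < j.toNat ∨ (x = j.toNat ∧ y < k0.toNat + 1)) := by
            constructor
            · rintro (h | ⟨h1, h2⟩)
              · exact Or.inl h
              · exact Or.inr ⟨h1, by omega⟩
            · rintro (h | ⟨h1, h2⟩)
              · exact Or.inl h
              · rcases Nat.lt_or_ge y k0.toNat with h3 | h3
                · exact Or.inr ⟨h1, h3⟩
                · exact absurd ⟨h1, by omega⟩ hxy
          rw [if_congr (by rw [this]) rfl rfl]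
      · rw [if_neg (by
          rw [ha, hb, hc]
          simp only [Bool.and_eq_true, Bool.or_eq_true, beq_iff_eq, decide_eq_true_eq,
            bne_iff_ne, ne_eq]
          intro hcc
          apply hcond
          refine ⟨?_, hcc.2.1, hcc.2.2⟩
          rcases hcc.1 with h | h
          · exact Or.inl h
          · exact Or.inr (by omega))]
        apply hnext
        refine pvRep_congr hg (fun x hx y hy => ?_)
        by_cases hxy : x = j.toNat ∧ y = k0.toNat
        · obtain ⟨rfl, rfl⟩ := hxy
          rw [pvMid_unprocessed]
          unfold pvMid
          rw [if_pos ⟨hsq.1, hsq.2.1, hsq.2.2.1, hsq.2.2.2, Or.inr ⟨rfl, by omega⟩⟩]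
          unfold pvF
          rw [if_neg hcond]
        · unfold pvMid
          have : (x < j.toNat ∨ (x = j.toNat ∧ y < k0.toNat)) ↔
              (x < j.toNat ∨ (x = j.toNat ∧ y < k0.toNat + 1)) := by
            constructor
            · rintro (h | ⟨h1, h2⟩)
              · exact Or.inl h
              · exact Or.inr ⟨h1, by omega⟩
            · rintro (h | ⟨h1, h2⟩)
              · exact Or.inl h
              · rcases Nat.lt_or_ge y k0.toNat with h3 | h3
                · exact Or.inr ⟨h1, h3⟩
                · exact absurd ⟨h1, by omega⟩ hxy
          rw [if_congr (by rw [this]) rfl rfl]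

theorem pvMid_start {n i : Nat} {M : Nat → Nat → Int} {x y : Nat} :
    pvMid n i M 1 1 x y = M x y := by
  unfold pvMid; split
  · omega
  · rfl

theorem pvMid_rowend {n i : Nat} {M : Nat → Nat → Int} {j x y : Nat} :
    pvMid n i M j n x y = pvMid n i M (j + 1) 1 x y := by
  unfold pvMid
  split_ifs with h1 h2 <;> first | rfl | omega

theorem pvMid_end {n i : Nat} {M : Nat → Nat → Int} {x y : Nat} :
    pvMid n i M n 1 x y = (if 1 ≤ x ∧ x < n ∧ 1 ≤ y ∧ y < n then pvF i M x y else M x y) := by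
  unfold pvMid
  split_ifs with h1 h2 <;> first | rfl | omega

def pvRowPass (N i : Int) (g : List (List Int)) (j : Int) : List (List Int) :=
  (PySem.List.pyRange 1 (N+1) 1).foldl (fun g k =>
    if ((pvMget g j k == 0 || decide (pvMget g j k > pvMget g j i + pvMget g i k))
        && (pvMget g j i != 0 && pvMget g i k != 0))
    then pvMset g j k (pvMget g j i + pvMget g i k) else g) g

theorem pvOuter {N : Int} {n : Nat} (hn : (n : Int) = N + 1) {i : Int} {M : Nat → Nat → Int}
    (hi1 : 1 ≤ i) (hin : i < (n : Int)) (hdiag : 0 ≤ M i.toNat i.toNat) :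
    ∀ (fuel : Nat) (j0 : Int), (N + 1 - j0).toNat = fuel → 1 ≤ j0 → j0 ≤ N + 1 →
    ∀ g, pvRep n g (pvMid n i.toNat M j0.toNat 1) →
    pvRep n ((PySem.List.pyRange j0 (N+1) 1).foldl (pvRowPass N i) g)
      (pvMid n i.toNat M n 1) := by
  intro fuel
  induction fuel with
  | zero =>
      intro j0 hfuel hj1 hjN g hg
      have hj : j0 = N + 1 := by omega
      subst hj
      rw [PySem.List.pyRange_one_eq_nil (le_refl (N+1))]
      simp only [List.foldl_nil]
      have : (N + 1).toNat = n := by omega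
      rwa [this] at hg
  | succ fuel ih =>
      intro j0 hfuel hj1 hjN g hg
      have hjlt : j0 < N + 1 := by omega
      rw [PySem.List.pyRange_one_cons hjlt]
      simp only [List.foldl_cons]
      have hrow := pvInner hn hi1 hin hj1 (by omega) hdiag ((N + 1 - 1).toNat) 1 rfl
        (by omega) (by omega) g (by
          have h1 : (1 : Int).toNat = 1 := rfl
          rwa [h1])
      apply ih (j0 + 1) (by omega) (by omega) (by omega)
      refine pvRep_congr hrow (fun x hx y hy => ?_)
      have hj01 : (j0 + 1).toNat = j0.toNat + 1 := by omega
      rw [hj01, ← pvMid_rowend]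

theorem pvDok_diag_nonneg {n : Nat} {E : Nat → Nat → Prop} {i : Nat} {M : Nat → Nat → Int}
    (h : pvDok n E i M) {x : Nat} (hx1 : 1 ≤ x) (hxn : x < n) : 0 ≤ M x x := by
  rcases h x x hx1 hxn hx1 hxn with ⟨h0, _⟩ | ⟨L, hL, _⟩ <;> omega

theorem pvFloydLoop {N : Int} {n : Nat} (hn : (n : Int) = N + 1) {E : Nat → Nat → Prop} :
    ∀ (fuel : Nat) (i0 : Int), (N + 1 - i0).toNat = fuel → 1 ≤ i0 → i0 ≤ N + 1 →
    ∀ g M, pvRep n g M → pvDok n E (i0.toNat - 1) M →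
    ∃ M', pvRep n ((PySem.List.pyRange i0 (N+1) 1).foldl
        (fun g i => (PySem.List.pyRange 1 (N+1) 1).foldl (pvRowPass N i) g) g) M' ∧
      pvDok n E (n - 1) M' := by
  intro fuel
  induction fuel with
  | zero =>
      intro i0 hfuel hi1 hiN g M hg hdok
      have hi : i0 = N + 1 := by omega
      subst hi
      rw [PySem.List.pyRange_one_eq_nil (le_refl (N+1))]
      simp only [List.foldl_nil]
      refine ⟨M, hg, ?_⟩
      rwa [(show (N + 1).toNat - 1 = n - 1 by omega)] at hdok
  | succ fuel ih =>
      intro i0 hfuel hi1 hiN g M hg hdok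
      have hilt : i0 < N + 1 := by omega
      rw [PySem.List.pyRange_one_cons hilt]
      simp only [List.foldl_cons]
      have hi0n : i0 < (n : Int) := by omega
      have hsq : 1 ≤ i0.toNat ∧ i0.toNat < n := by omega
      have hdiag : 0 ≤ M i0.toNat i0.toNat := pvDok_diag_nonneg hdok hsq.1 hsq.2
      have hpass := pvOuter hn hi1 hi0n hdiag ((N + 1 - 1).toNat) 1 rfl (by omega) (by omega) g
        (by refine pvRep_congr hg (fun x hx y hy => ?_)
            have h1 : (1 : Int).toNat = 1 := rfl
            rw [h1, pvMid_start])
      have hrep' := pvRep_congr hpass (fun x hx y hy => pvMid_end)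
      have heq : i0.toNat - 1 + 1 = i0.toNat := by omega
      have hstep := pvDok_step hdok (by omega : i0.toNat - 1 + 1 < n)
      rw [heq] at hstep
      exact ih (i0 + 1) (by omega) (by omega) (by omega) _ _ hrep'
        (by rw [(by omega : (i0 + 1).toNat - 1 = i0.toNat)]; exact hstep)

def pvInR (n : Nat) (w : Int) : Prop := -(n : Int) ≤ w ∧ w < (n : Int)

def pvAdjRep (n : Nat) (edges : List (Int × Int)) (adj : List (List Int)) : Prop :=
  adj.length = n ∧ ∀ u, u < n →
    (∀ w ∈ adj.getD u [], pvInR n w) ∧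
    (∀ v, v < n → ((∃ w ∈ adj.getD u [], pvNormIdx n w = v) ↔ pvE n edges u v))

theorem pvAppendAt_row {n : Nat} {adj : List (List Int)} (hlen : adj.length = n)
    {i : Int} (hi : pvInR n i) (w : Int) {u : Nat} (hu : u < n) :
    (pvAppendAt adj i w).getD u [] =
      if u = pvNormIdx n i then adj.getD u [] ++ [w] else adj.getD u [] := by
  unfold pvAppendAt
  rw [hlen]
  by_cases he : u = pvNormIdx n i
  · subst he
    rw [if_pos rfl, getD_set_self _ _ _ _ (by rw [hlen]; exact pvNormIdx_lt hi.1 hi.2 (by omega))]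
  · rw [if_neg he, getD_set_ne _ _ _ _ _ (fun hh => he hh.symm)]

theorem pvAppendAt_len {adj : List (List Int)} {i w : Int} :
    (pvAppendAt adj i w).length = adj.length := by
  unfold pvAppendAt; simp

-- one edge (a, b): row a gains b, row b gains a
theorem pvAdjRep_step {n : Nat} {l : List (Int × Int)} {adj : List (List Int)}
    (h : pvAdjRep n l adj) {p : Int × Int} (h1 : pvInR n p.1) (h2 : pvInR n p.2) :
    pvAdjRep n (l ++ [p]) (pvAppendAt (pvAppendAt adj p.1 p.2) p.2 p.1) := by
  obtain ⟨hlen, hrows⟩ := h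
  have hlen1 : (pvAppendAt adj p.1 p.2).length = n := by rw [pvAppendAt_len, hlen]
  refine ⟨by rw [pvAppendAt_len, hlen1], fun u hu => ?_⟩
  have hrow : (pvAppendAt (pvAppendAt adj p.1 p.2) p.2 p.1).getD u [] =
      (if u = pvNormIdx n p.2 then
        (if u = pvNormIdx n p.1 then adj.getD u [] ++ [p.2] else adj.getD u []) ++ [p.1]
       else (if u = pvNormIdx n p.1 then adj.getD u [] ++ [p.2] else adj.getD u [])) := by
    rw [pvAppendAt_row hlen1 h2 p.1 hu, pvAppendAt_row hlen h1 p.2 hu]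
  rw [hrow]
  constructor
  · intro w hw
    split_ifs at hw with c1 c2 c3 <;> (try simp only [List.mem_append, List.mem_singleton] at hw)
    · rcases hw with (hw | rfl) | rfl
      · exact (hrows u hu).1 w hw
      · exact h2
      · exact h1
    · rcases hw with hw | rfl
      · exact (hrows u hu).1 w hw
      · exact h1
    · rcases hw with hw | rfl
      · exact (hrows u hu).1 w hw
      · exact h2
    · exact (hrows u hu).1 w hw
  · intro v hv
    have hsplit : ∀ (xs : List Int) (a : Int),
        (∃ w ∈ xs ++ [a], pvNormIdx n w = v) ↔
        ((∃ w ∈ xs, pvNormIdx n w = v) ∨ pvNormIdx n a = v) := by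
      intro xs a
      simp only [List.mem_append, List.mem_singleton]
      constructor
      · rintro ⟨w, (hw | rfl), hp⟩
        · exact Or.inl ⟨w, hw, hp⟩
        · exact Or.inr hp
      · rintro (⟨w, hw, hp⟩ | hp)
        · exact ⟨w, Or.inl hw, hp⟩
        · exact ⟨a, Or.inr rfl, hp⟩
    rw [pvE_append_single]
    rw [← (hrows u hu).2 v hv]
    split_ifs with c1 c2 c3
    · rw [hsplit, hsplit]
      constructor
      · rintro ((b | h2) | h1)
        · exact Or.inl b
        · exact Or.inr (Or.inl ⟨c2.symm, h2⟩)
        · exact Or.inr (Or.inr ⟨c1.symm, h1⟩)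
      · rintro (b | ⟨_, h2⟩ | ⟨_, h1⟩)
        · exact Or.inl (Or.inl b)
        · exact Or.inl (Or.inr h2)
        · exact Or.inr h1
    · rw [hsplit]
      constructor
      · rintro (b | h1)
        · exact Or.inl b
        · exact Or.inr (Or.inr ⟨c1.symm, h1⟩)
      · rintro (b | ⟨ha, hb⟩ | ⟨_, h1⟩)
        · exact Or.inl b
        · exact absurd ha.symm c2
        · exact Or.inr h1
    · rw [hsplit]
      constructor
      · rintro (b | h2)
        · exact Or.inl b
        · exact Or.inr (Or.inl ⟨c3.symm, h2⟩)
      · rintro (b | ⟨_, hb⟩ | ⟨ha, _⟩)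
        · exact Or.inl b
        · exact Or.inr hb
        · exact absurd ha.symm c1
    · constructor
      · exact Or.inl
      · rintro (b | ⟨ha, _⟩ | ⟨ha, _⟩)
        · exact b
        · exact absurd ha.symm c3
        · exact absurd ha.symm c1

theorem pvAdjRep_build {n : Nat} (edges : List (Int × Int))
    (hpre : ∀ p ∈ edges, pvInR n p.1 ∧ pvInR n p.2) :
    pvAdjRep n edges (edges.foldl (fun ad p => pvAppendAt (pvAppendAt ad p.1 p.2) p.2 p.1)
      (List.replicate n ([] : List Int))) := by
  suffices h : ∀ todo done adj, (∀ p ∈ todo, pvInR n p.1 ∧ pvInR n p.2) →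
      pvAdjRep n done adj →
      pvAdjRep n (done ++ todo) (todo.foldl (fun ad p => pvAppendAt (pvAppendAt ad p.1 p.2) p.2 p.1) adj) by
    have base : pvAdjRep n [] (List.replicate n ([] : List Int)) := by
      refine ⟨by simp, fun u hu => ⟨?_, fun v hv => ?_⟩⟩
      · simp [List.getD, List.getElem?_replicate, hu]
      · simp [List.getD, List.getElem?_replicate, hu, pvE]
    simpa using h edges [] _ hpre base
  intro todo
  induction todo with
  | nil => intro done adj _ h; simpa using h
  | cons p todo ih =>
      intro done adj hpre h
      obtain ⟨h1, h2⟩ := hpre p (by simp)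
      have := ih (done ++ [p]) _ (fun q hq => hpre q (by simp [hq])) (pvAdjRep_step h h1 h2)
      simpa [List.append_assoc] using this

def pvSeenRep (n : Nat) (seen : List Bool) (S : Nat → Prop) : Prop :=
  seen.length = n ∧ ∀ v, v < n → ((seen.getD v false = true) ↔ S v)

def pvFrontRep (n : Nat) (fr : List Int) (P : Nat → Prop) : Prop :=
  (∀ w ∈ fr, pvInR n w) ∧ ∀ v, v < n → ((∃ w ∈ fr, pvNormIdx n w = v) ↔ P v)

theorem pvSeenRep_congr {n seen S S'} (h : pvSeenRep n seen S)
    (he : ∀ v, v < n → (S v ↔ S' v)) : pvSeenRep n seen S' :=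
  ⟨h.1, fun v hv => (h.2 v hv).trans (he v hv)⟩

theorem pvFrontRep_congr {n fr P P'} (h : pvFrontRep n fr P)
    (he : ∀ v, v < n → (P v ↔ P' v)) : pvFrontRep n fr P' :=
  ⟨h.1, fun v hv => (h.2 v hv).trans (he v hv)⟩

theorem pvBget_eq {n seen S} (h : pvSeenRep n seen S) {w : Int} (hw : pvInR n w) :
    pvBget seen w = seen.getD (pvNormIdx n w) false := by
  unfold pvBget
  rw [pvGet_eq h.1 hw.1 hw.2 false]
  rfl

-- scanning one adjacency row
theorem pvScan {n : Nat} (S0 : Nat → Prop) :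
    ∀ (ws : List Int) (Q : Nat → Prop) (seen : List Bool) (nxt : List Int),
    (∀ w ∈ ws, pvInR n w) →
    pvSeenRep n seen (fun v => S0 v ∨ Q v) →
    pvFrontRep n nxt (fun v => ¬ S0 v ∧ Q v) →
    pvSeenRep n (ws.foldl (fun st w =>
        if pvBget st.1 w then st else (pvBset st.1 w, st.2 ++ [w])) (seen, nxt)).1
      (fun v => S0 v ∨ (Q v ∨ ∃ w ∈ ws, pvNormIdx n w = v)) ∧
    pvFrontRep n (ws.foldl (fun st w =>
        if pvBget st.1 w then st else (pvBset st.1 w, st.2 ++ [w])) (seen, nxt)).2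
      (fun v => ¬ S0 v ∧ (Q v ∨ ∃ w ∈ ws, pvNormIdx n w = v)) := by
  intro ws
  induction ws with
  | nil =>
      intro Q seen nxt hws hseen hnxt
      simp only [List.foldl_nil]
      constructor
      · exact pvSeenRep_congr hseen (fun v hv => by simp)
      · exact pvFrontRep_congr hnxt (fun v hv => by simp)
  | cons w ws ih =>
      intro Q seen nxt hws hseen hnxt
      have hw : pvInR n w := hws w (by simp)
      have hv0 : pvNormIdx n w < n := pvNormIdx_lt hw.1 hw.2 (by
        rcases hw with ⟨a, b⟩; omega)
      simp only [List.foldl_cons]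
      have hmerge : ∀ v, v < n →
          (((Q v ∨ v = pvNormIdx n w) ∨ ∃ x ∈ ws, pvNormIdx n x = v) ↔
           (Q v ∨ ∃ x ∈ w :: ws, pvNormIdx n x = v)) := by
        intro v hv
        simp only [List.mem_cons]
        constructor
        · rintro ((h | rfl) | ⟨x, hx, hnx⟩)
          · exact Or.inl h
          · exact Or.inr ⟨w, Or.inl rfl, rfl⟩
          · exact Or.inr ⟨x, Or.inr hx, hnx⟩
        · rintro (h | ⟨x, (rfl | hx), hnx⟩)
          · exact Or.inl (Or.inl h)
          · exact Or.inl (Or.inr hnx.symm)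
          · exact Or.inr ⟨x, hx, hnx⟩
      by_cases hb : pvBget seen w = true
      · rw [if_pos hb]
        rw [pvBget_eq hseen hw] at hb
        have hsv0 : S0 (pvNormIdx n w) ∨ Q (pvNormIdx n w) := (hseen.2 _ hv0).mp hb
        have hrec := ih (fun v => Q v ∨ v = pvNormIdx n w) seen nxt
          (fun x hx => hws x (by simp [hx]))
          (pvSeenRep_congr hseen (fun v hv => by
            constructor
            · rintro (h | h)
              · exact Or.inl h
              · exact Or.inr (Or.inl h)
            · rintro (h | h | rfl)
              · exact Or.inl h
              · exact Or.inr h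
              · exact hsv0))
          (pvFrontRep_congr hnxt (fun v hv => by
            constructor
            · rintro ⟨h1, h2⟩
              exact ⟨h1, Or.inl h2⟩
            · rintro ⟨h1, h2 | rfl⟩
              · exact ⟨h1, h2⟩
              · rcases hsv0 with h | h
                · exact absurd h h1
                · exact ⟨h1, h⟩))
        constructor
        · exact pvSeenRep_congr hrec.1 (fun v hv => by
            constructor
            · rintro (h | h)
              · exact Or.inl h
              · exact Or.inr ((hmerge v hv).mp h)
            · rintro (h | h)
              · exact Or.inl h
              · exact Or.inr ((hmerge v hv).mpr h))
        · exact pvFrontRep_congr hrec.2 (fun v hv => by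
            constructor
            · rintro ⟨h1, h2⟩
              exact ⟨h1, (hmerge v hv).mp h2⟩
            · rintro ⟨h1, h2⟩
              exact ⟨h1, (hmerge v hv).mpr h2⟩)
      · rw [if_neg hb]
        rw [pvBget_eq hseen hw] at hb
        have hns : ¬ (S0 (pvNormIdx n w) ∨ Q (pvNormIdx n w)) := by
          intro hcc
          exact hb ((hseen.2 _ hv0).mpr hcc)
        have hseen' : pvSeenRep n (pvBset seen w)
            (fun v => S0 v ∨ (Q v ∨ v = pvNormIdx n w)) := by
          constructor
          · unfold pvBset
            rw [PySem.List.length_pySetD]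
            exact hseen.1
          · intro v hv
            unfold pvBset
            rw [pvSetD_eq hseen.1 hw.1 hw.2]
            by_cases hev : v = pvNormIdx n w
            · subst hev
              rw [getD_set_self _ _ _ _ (by rw [hseen.1]; omega)]
              simp
            · rw [getD_set_ne _ _ _ _ _ (fun hh => hev hh.symm)]
              rw [hseen.2 v hv]
              constructor
              · rintro (h | h)
                · exact Or.inl h
                · exact Or.inr (Or.inl h)
              · rintro (h | h | h)
                · exact Or.inl h
                · exact Or.inr h
                · exact absurd h hev
        have hnxt' : pvFrontRep n (nxt ++ [w])
            (fun v => ¬ S0 v ∧ (Q v ∨ v = pvNormIdx n w)) := by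
          constructor
          · intro x hx
            simp only [List.mem_append, List.mem_singleton] at hx
            rcases hx with hx | rfl
            · exact hnxt.1 x hx
            · exact hw
          · intro v hv
            constructor
            · rintro ⟨x, hx, hnx⟩
              simp only [List.mem_append, List.mem_singleton] at hx
              rcases hx with hx | rfl
              · obtain ⟨a, b⟩ := (hnxt.2 v hv).mp ⟨x, hx, hnx⟩
                exact ⟨a, Or.inl b⟩
              · exact ⟨fun hS => hns (Or.inl (hnx ▸ hS)), Or.inr hnx.symm⟩
            · rintro ⟨h1, (h2 | rfl)⟩
              · obtain ⟨x, hx, hnx⟩ := (hnxt.2 v hv).mpr ⟨h1, h2⟩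
                exact ⟨x, by simp [hx], hnx⟩
              · exact ⟨w, by simp, rfl⟩
        have hrec := ih (fun v => Q v ∨ v = pvNormIdx n w) (pvBset seen w) (nxt ++ [w])
          (fun x hx => hws x (by simp [hx])) hseen' hnxt'
        constructor
        · exact pvSeenRep_congr hrec.1 (fun v hv => by
            constructor
            · rintro (h | h)
              · exact Or.inl h
              · exact Or.inr ((hmerge v hv).mp h)
            · rintro (h | h)
              · exact Or.inl h
              · exact Or.inr ((hmerge v hv).mpr h))
        · exact pvFrontRep_congr hrec.2 (fun v hv => by
            constructor
            · rintro ⟨h1, h2⟩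
              exact ⟨h1, (hmerge v hv).mp h2⟩
            · rintro ⟨h1, h2⟩
              exact ⟨h1, (hmerge v hv).mpr h2⟩)

theorem pvRowAt_eq {n : Nat} {edges adj} (hadj : pvAdjRep n edges adj) {u : Int}
    (hu : pvInR n u) : pvRowAt adj u = adj.getD (pvNormIdx n u) [] := by
  unfold pvRowAt
  rw [pvGet_eq hadj.1 hu.1 hu.2 []]
  rfl

theorem pvRoundAux {n : Nat} {edges adj} (hadj : pvAdjRep n edges adj) (S0 : Nat → Prop) :
    ∀ (fr : List Int) (Q : Nat → Prop) (st : List Bool × List Int),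
    (∀ w ∈ fr, pvInR n w) →
    pvSeenRep n st.1 (fun v => S0 v ∨ Q v) →
    pvFrontRep n st.2 (fun v => ¬ S0 v ∧ Q v) →
    pvSeenRep n (fr.foldl (fun st v =>
        (pvRowAt adj v).foldl (fun st w =>
          if pvBget st.1 w then st else (pvBset st.1 w, st.2 ++ [w])) st) st).1
      (fun v => S0 v ∨ (Q v ∨ ∃ u ∈ fr, pvE n edges (pvNormIdx n u) v)) ∧
    pvFrontRep n (fr.foldl (fun st v =>
        (pvRowAt adj v).foldl (fun st w =>
          if pvBget st.1 w then st else (pvBset st.1 w, st.2 ++ [w])) st) st).2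
      (fun v => ¬ S0 v ∧ (Q v ∨ ∃ u ∈ fr, pvE n edges (pvNormIdx n u) v)) := by
  intro fr
  induction fr with
  | nil =>
      intro Q st hfr hseen hnxt
      simp only [List.foldl_nil]
      exact ⟨pvSeenRep_congr hseen (fun v hv => by simp),
        pvFrontRep_congr hnxt (fun v hv => by simp)⟩
  | cons u fr ih =>
      intro Q st hfr hseen hnxt
      have hu : pvInR n u := hfr u (by simp)
      have hun : pvNormIdx n u < n := pvNormIdx_lt hu.1 hu.2 (by rcases hu with ⟨a, b⟩; omega)
      simp only [List.foldl_cons]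
      have hrow : pvRowAt adj u = adj.getD (pvNormIdx n u) [] := pvRowAt_eq hadj hu
      have hrowR : ∀ w ∈ pvRowAt adj u, pvInR n w := by
        rw [hrow]; exact (hadj.2 _ hun).1
      have hscan := pvScan S0 (pvRowAt adj u) Q st.1 st.2 hrowR hseen hnxt
      have hiff : ∀ v, v < n →
          ((Q v ∨ ∃ w ∈ pvRowAt adj u, pvNormIdx n w = v) ↔
           (Q v ∨ pvE n edges (pvNormIdx n u) v)) := by
        intro v hv
        rw [hrow]
        exact or_congr Iff.rfl ((hadj.2 _ hun).2 v hv)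
      have hrec := ih (fun v => Q v ∨ pvE n edges (pvNormIdx n u) v)
        ((pvRowAt adj u).foldl (fun st w =>
          if pvBget st.1 w then st else (pvBset st.1 w, st.2 ++ [w])) st)
        (fun x hx => hfr x (by simp [hx]))
        (by
          have h1 := pvSeenRep_congr hscan.1 (fun v hv => or_congr Iff.rfl (hiff v hv))
          simpa using h1)
        (by
          have h2 := pvFrontRep_congr hscan.2 (fun v hv => and_congr Iff.rfl (hiff v hv))
          simpa using h2)
      constructor
      · refine pvSeenRep_congr hrec.1 (fun v hv => or_congr Iff.rfl ?_)
        simp only [List.mem_cons]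
        constructor
        · rintro ((h | h) | ⟨x, hx, he⟩)
          · exact Or.inl h
          · exact Or.inr ⟨u, Or.inl rfl, h⟩
          · exact Or.inr ⟨x, Or.inr hx, he⟩
        · rintro (h | ⟨x, (rfl | hx), he⟩)
          · exact Or.inl (Or.inl h)
          · exact Or.inl (Or.inr he)
          · exact Or.inr ⟨x, hx, he⟩
      · refine pvFrontRep_congr hrec.2 (fun v hv => and_congr Iff.rfl ?_)
        simp only [List.mem_cons]
        constructor
        · rintro ((h | h) | ⟨x, hx, he⟩)
          · exact Or.inl h
          · exact Or.inr ⟨u, Or.inl rfl, h⟩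
          · exact Or.inr ⟨x, Or.inr hx, he⟩
        · rintro (h | ⟨x, (rfl | hx), he⟩)
          · exact Or.inl (Or.inl h)
          · exact Or.inl (Or.inr he)
          · exact Or.inr ⟨x, hx, he⟩

theorem pvRound_spec {n : Nat} {edges adj} (hadj : pvAdjRep n edges adj) (S0 : Nat → Prop)
    (fr : List Int) (seen : List Bool)
    (hfr : ∀ w ∈ fr, pvInR n w)
    (hseen : pvSeenRep n seen S0) :
    pvSeenRep n (pvBfsRound adj seen fr).1
      (fun v => S0 v ∨ ∃ u ∈ fr, pvE n edges (pvNormIdx n u) v) ∧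
    pvFrontRep n (pvBfsRound adj seen fr).2
      (fun v => ¬ S0 v ∧ ∃ u ∈ fr, pvE n edges (pvNormIdx n u) v) := by
  have h := pvRoundAux hadj S0 fr (fun _ => False) (seen, []) hfr
    (pvSeenRep_congr hseen (fun v hv => by simp))
    (by
      refine ⟨by simp, fun v hv => ?_⟩
      simp)
  unfold pvBfsRound
  exact ⟨pvSeenRep_congr h.1 (fun v hv => by simp),
    pvFrontRep_congr h.2 (fun v hv => by simp)⟩

-- ---- BFS layers vs walks ----

def pvDle (E : Nat → Nat → Prop) (b s r v : Nat) : Prop :=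
  v = s ∨ ∃ L, L ≤ r ∧ pvW E b L s v

def pvDex (E : Nat → Nat → Prop) (b s r v : Nat) : Prop :=
  pvDle E b s r v ∧ ∀ r' < r, ¬ pvDle E b s r' v

theorem pvDle_mono {E b s r r' v} (h : pvDle E b s r v) (hr : r ≤ r') : pvDle E b s r' v := by
  rcases h with h | ⟨L, hL, hw⟩
  · exact Or.inl h
  · exact Or.inr ⟨L, by omega, hw⟩

theorem pvDle_snoc {E b s r u v} (h : pvDle E b s r u) (he : E u v) (hu1 : 1 ≤ u) (hub : u ≤ b) :
    pvDle E b s (r + 1) v := by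
  rcases h with rfl | ⟨L, hL, hw⟩
  · exact Or.inr ⟨1, by omega, pvW.single he⟩
  · exact Or.inr ⟨L + 1, by omega, pvW_snoc hw he hu1 hub⟩

theorem pvDle_zero {E b s v} (h : pvDle E b s 0 v) : v = s := by
  rcases h with h | ⟨L, hL, hw⟩
  · exact h
  · exact absurd (pvW_pos hw) (by omega)

theorem pvDle_last {E b s r v} (hs1 : 1 ≤ s) (hsb : s ≤ b)
    (h : pvDle E b s (r + 1) v) (hnot : ¬ pvDle E b s r v) :
    ∃ u, 1 ≤ u ∧ u ≤ b ∧ pvDle E b s r u ∧ E u v := by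
  rcases h with rfl | ⟨L, hL, hw⟩
  · exact absurd (Or.inl rfl) hnot
  · have hL1 : 1 ≤ L := pvW_pos hw
    have hLr : L = r + 1 := by
      by_contra hc
      exact hnot (Or.inr ⟨L, by omega, hw⟩)
    subst hLr
    by_cases hr0 : r = 0
    · subst hr0
      cases hw with
      | single he => exact ⟨s, hs1, hsb, Or.inl rfl, he⟩
      | cons he h1 h2 hw2 => exact absurd (pvW_pos hw2) (by omega)
    · obtain ⟨L', hL'⟩ : ∃ L', r + 1 = L' + 1 := ⟨r, rfl⟩
      rw [hL'] at hw
      obtain ⟨m, hm1, hmb, hwm, hme⟩ := pvW_last hw (by omega)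
      exact ⟨m, hm1, hmb, Or.inr ⟨L', by omega, hwm⟩, hme⟩

theorem pvDex_of_dle {E b s r v} (h : pvDle E b s r v) :
    ∃ r'' ≤ r, pvDex E b s r'' v := by
  induction r using Nat.strong_induction_on with
  | _ r ih =>
      by_cases hall : ∀ r' < r, ¬ pvDle E b s r' v
      · exact ⟨r, le_refl r, h, hall⟩
      · push Not at hall
        obtain ⟨r', hr', hd⟩ := hall
        obtain ⟨r'', hr'', hdex⟩ := ih r' hr' hd
        exact ⟨r'', by omega, hdex⟩

-- one BFS level advances the layer structure by one
theorem pvLayer {n : Nat} {E : Nat → Nat → Prop} {s r : Nat}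
    (hs1 : 1 ≤ s) (hsn : s < n) :
    ∀ v, v < n →
    ((((v = 0 ∨ pvDle E (n-1) s r v) ∨ ∃ u, u < n ∧ 1 ≤ u ∧ pvDex E (n-1) s r u ∧ E u v) ↔
      (v = 0 ∨ pvDle E (n-1) s (r+1) v)) ∧
     (((¬ (v = 0 ∨ pvDle E (n-1) s r v)) ∧ ∃ u, u < n ∧ 1 ≤ u ∧ pvDex E (n-1) s r u ∧ E u v) ↔
      (1 ≤ v ∧ pvDex E (n-1) s (r+1) v))) := by
  intro v hv
  have hsb : s ≤ n - 1 := by omega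
  have forward : (∃ u, u < n ∧ 1 ≤ u ∧ pvDex E (n-1) s r u ∧ E u v) → pvDle E (n-1) s (r+1) v := by
    rintro ⟨u, hun, hu1, hdex, he⟩
    exact pvDle_snoc hdex.1 he hu1 (by omega)
  have backward : pvDle E (n-1) s (r+1) v → ¬ pvDle E (n-1) s r v →
      ∃ u, u < n ∧ 1 ≤ u ∧ pvDex E (n-1) s r u ∧ E u v := by
    intro h hnot
    obtain ⟨u, hu1, hub, hdle, he⟩ := pvDle_last hs1 hsb h hnot
    obtain ⟨r'', hr'', hdex⟩ := pvDex_of_dle hdle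
    rcases Nat.lt_or_ge r'' r with hlt | hge
    · exfalso
      exact hnot (pvDle_mono (pvDle_snoc hdex.1 he hu1 hub) (by omega))
    · have : r'' = r := by omega
      subst this
      exact ⟨u, by omega, hu1, hdex, he⟩
  constructor
  · constructor
    · rintro ((h | h) | h)
      · exact Or.inl h
      · exact Or.inr (pvDle_mono h (by omega))
      · exact Or.inr (forward h)
    · rintro (h | h)
      · exact Or.inl (Or.inl h)
      · by_cases hd : pvDle E (n-1) s r v
        · exact Or.inl (Or.inr hd)
        · exact Or.inr (backward h hd)
  · constructor
    · rintro ⟨h1, h2⟩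
      have hv0 : v ≠ 0 := fun hh => h1 (Or.inl hh)
      refine ⟨by omega, forward h2, fun r' hr' hdd => ?_⟩
      exact h1 (Or.inr (pvDle_mono hdd (by omega)))
    · rintro ⟨hv1, hdex⟩
      have hnd : ¬ pvDle E (n-1) s r v := hdex.2 r (by omega)
      refine ⟨?_, backward hdex.1 hnd⟩
      rintro (h | h)
      · omega
      · exact hnd h

theorem pvBset_rep {n : Nat} {seen : List Bool} {S : Nat → Prop} (h : pvSeenRep n seen S)
    {i : Int} (hi : pvInR n i) :
    pvSeenRep n (pvBset seen i) (fun v => S v ∨ v = pvNormIdx n i) := by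
  constructor
  · unfold pvBset
    rw [PySem.List.length_pySetD]
    exact h.1
  · intro v hv
    unfold pvBset
    rw [pvSetD_eq h.1 hi.1 hi.2]
    by_cases hev : v = pvNormIdx n i
    · subst hev
      rw [getD_set_self _ _ _ _ (by rw [h.1]; exact pvNormIdx_lt hi.1 hi.2 (by omega))]
      simp
    · rw [getD_set_ne _ _ _ _ _ (fun hh => hev hh.symm)]
      rw [h.2 v hv]
      simp [hev]

theorem pvRoundsSpec {n : Nat} {edges adj} (hadj : pvAdjRep n edges adj)
    {E : Nat → Nat → Prop} (hE : E = pvE n edges) {s : Nat} (hs1 : 1 ≤ s) (hsn : s < n) :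
    ∀ (c r : Nat) (seen : List Bool) (fr : List Int),
    pvSeenRep n seen (fun v => v = 0 ∨ pvDle E (n-1) s r v) →
    pvFrontRep n fr (fun v => 1 ≤ v ∧ pvDex E (n-1) s r v) →
    pvSeenRep n (pvBfsRounds c adj seen fr) (fun v => v = 0 ∨ pvDle E (n-1) s (r + c) v) := by
  intro c
  induction c with
  | zero =>
      intro r seen fr hseen hfr
      simpa using hseen
  | succ c ih =>
      intro r seen fr hseen hfr
      show pvSeenRep n (pvBfsRounds c adj (pvBfsRound adj seen fr).1 (pvBfsRound adj seen fr).2) _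
      have hround := pvRound_spec hadj _ fr seen hfr.1 hseen
      have hnbr : ∀ v, v < n →
          ((∃ u ∈ fr, pvE n edges (pvNormIdx n u) v) ↔
           (∃ u, u < n ∧ 1 ≤ u ∧ pvDex E (n-1) s r u ∧ E u v)) := by
        intro v hv
        constructor
        · rintro ⟨w, hw, he⟩
          have hwin := hfr.1 w hw
          have hwn : pvNormIdx n w < n := pvNormIdx_lt hwin.1 hwin.2 (by omega)
          obtain ⟨h1, h2⟩ := (hfr.2 _ hwn).mp ⟨w, hw, rfl⟩
          exact ⟨pvNormIdx n w, hwn, h1, h2, hE ▸ he⟩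
        · rintro ⟨u, hun, hu1, hdex, he⟩
          obtain ⟨w, hw, hnw⟩ := (hfr.2 u hun).mpr ⟨hu1, hdex⟩
          exact ⟨w, hw, by rw [hnw]; exact hE ▸ he⟩
      have hseen' : pvSeenRep n (pvBfsRound adj seen fr).1
          (fun v => v = 0 ∨ pvDle E (n-1) s (r+1) v) :=
        pvSeenRep_congr hround.1 (fun v hv => by
          rw [or_congr Iff.rfl (hnbr v hv)]
          exact (pvLayer hs1 hsn v hv).1)
      have hfr' : pvFrontRep n (pvBfsRound adj seen fr).2
          (fun v => 1 ≤ v ∧ pvDex E (n-1) s (r+1) v) :=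
        pvFrontRep_congr hround.2 (fun v hv => by
          rw [and_congr Iff.rfl (hnbr v hv)]
          exact (pvLayer hs1 hsn v hv).2)
      have := ih (r + 1) _ _ hseen' hfr'
      rwa [(by omega : r + 1 + c = r + (c + 1))] at this

-- seen set after the six BFS levels from source s
theorem pvBfs_seen {n : Nat} {edges adj} (hadj : pvAdjRep n edges adj)
    {s : Int} (hs1 : 1 ≤ s) (hsn : s < (n : Int)) :
    pvSeenRep n (pvBfsRounds 6 adj (pvBset (pvBset (List.replicate n false) 0) s) [s])
      (fun v => v = 0 ∨ pvDle (pvE n edges) (n-1) s.toNat 6 v) := by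
  have hnpos : 0 < n := by omega
  have h0in : pvInR n 0 := ⟨by omega, by omega⟩
  have hsin : pvInR n s := ⟨by omega, hsn⟩
  have hbase : pvSeenRep n (List.replicate n false) (fun _ => False) := by
    refine ⟨by simp, fun v hv => ?_⟩
    simp [List.getD, List.getElem?_replicate, hv]
  have h1 := pvBset_rep hbase h0in
  have h2 := pvBset_rep h1 hsin
  have hnorm0 : pvNormIdx n (0 : Int) = 0 := by unfold pvNormIdx; simp
  have hnorms : pvNormIdx n s = s.toNat := pvNormIdx_of_nonneg (by omega)
  have hseen0 : pvSeenRep n (pvBset (pvBset (List.replicate n false) 0) s)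
      (fun v => v = 0 ∨ pvDle (pvE n edges) (n-1) s.toNat 0 v) :=
    pvSeenRep_congr h2 (fun v hv => by
      rw [hnorm0, hnorms]
      constructor
      · rintro ((h | h) | h)
        · exact absurd h not_false
        · exact Or.inl h
        · exact Or.inr (Or.inl h)
      · rintro (h | h)
        · exact Or.inl (Or.inr h)
        · exact Or.inr (pvDle_zero h))
  have hfr0 : pvFrontRep n [s] (fun v => 1 ≤ v ∧ pvDex (pvE n edges) (n-1) s.toNat 0 v) := by
    refine ⟨fun w hw => by simp at hw; subst hw; exact hsin, fun v hv => ?_⟩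
    constructor
    · rintro ⟨w, hw, hnw⟩
      simp at hw
      subst hw
      rw [hnorms] at hnw
      subst hnw
      exact ⟨by omega, Or.inl rfl, fun r' hr' => by omega⟩
    · rintro ⟨hv1, hdex⟩
      have := pvDle_zero hdex.1
      subst this
      exact ⟨s, by simp, hnorms⟩
  have := pvRoundsSpec hadj rfl (by omega : 1 ≤ s.toNat) (by omega : s.toNat < n)
    6 0 _ [s] hseen0 hfr0
  simpa using this

theorem solution_eq (N : Int) (K : Int) (edges : List (Int × Int))
    (hpre : Pre_solution N K edges) : solution N K edges = solution_alt N K edges := by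
  by_cases hN : N + 1 ≤ 1
  · -- no vertex pair to check: both sides are "Small World!"
    unfold solution solution_alt
    rw [PySem.List.pyRange_one_eq_nil hN]
    simp
  · have hN1 : 1 ≤ N := by omega
    set n := (N + 1).toNat with hndef
    have hn : (n : Int) = N + 1 := by omega
    have hpre4 : ∀ p ∈ edges, -(n : Int) ≤ p.1 ∧ p.1 < n ∧ -(n : Int) ≤ p.2 ∧ p.2 < n := by
      intro p hp
      obtain ⟨a1, a2, a3, a4⟩ := hpre p hp
      omega
    have hpreIn : ∀ p ∈ edges, pvInR n p.1 ∧ pvInR n p.2 := by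
      intro p hp
      obtain ⟨a1, a2, a3, a4⟩ := hpre4 p hp
      exact ⟨⟨a1, a2⟩, ⟨a3, a4⟩⟩
    -- A side: the final matrix holds minimal walk lengths
    have hrep1 := pvRep_init (n := n) edges hpre4
    have hdok0 : pvDok n (pvE n edges) 0
        (fun x y => @ite Int (pvE n edges x y) (pvE_dec n edges x y) 1 0) :=
      @pvDok_base n (pvE n edges) (fun u v => pvE_dec n edges u v)
    obtain ⟨M, hrepF, hdokF⟩ := pvFloydLoop (E := pvE n edges) hn ((N + 1 - 1).toNat) 1 rfl
      (by omega) (by omega) _ _ hrep1 (by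
        have he : (1 : Int).toNat - 1 = 0 := rfl
        rw [he]
        exact hdok0)
    -- B side: adjacency representation
    have hadj := pvAdjRep_build (n := n) edges hpreIn
    -- both answers test the same walk condition pair by pair
    have hA : solution N K edges =
        (if (PySem.List.pyRange 1 (N+1) 1).any (fun y =>
            (PySem.List.pyRange (y+1) (N+1) 1).any (fun x =>
              pvMget ((PySem.List.pyRange 1 (N+1) 1).foldl (fun g i =>
                (PySem.List.pyRange 1 (N+1) 1).foldl (pvRowPass N i) g)
                (edges.foldl (fun g p => pvMset (pvMset g p.1 p.2 1) p.2 p.1 1)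
                  (List.replicate n (List.replicate n 0)))) y x == 0 ||
              decide (pvMget ((PySem.List.pyRange 1 (N+1) 1).foldl (fun g i =>
                (PySem.List.pyRange 1 (N+1) 1).foldl (pvRowPass N i) g)
                (edges.foldl (fun g p => pvMset (pvMset g p.1 p.2 1) p.2 p.1 1)
                  (List.replicate n (List.replicate n 0)))) y x > 6)))
         then "Big World!" else "Small World!") := rfl
    have hB : solution_alt N K edges =
        (if (PySem.List.pyRange 1 (N+1) 1).any (fun s =>
            (PySem.List.pyRange (s+1) (N+1) 1).any (fun t =>
              !(pvBget (pvBfsRounds 6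
                  (edges.foldl (fun ad p => pvAppendAt (pvAppendAt ad p.1 p.2) p.2 p.1)
                    (List.replicate n ([] : List Int)))
                  (pvBset (pvBset (List.replicate n false) 0) s) [s]) t)))
         then "Big World!" else "Small World!") := rfl
    rw [hA, hB]
    congr 1
    apply propext
    rw [List.any_eq_true, List.any_eq_true]
    constructor
    all_goals
      rintro ⟨y, hy, hinner⟩
      refine ⟨y, hy, ?_⟩
      rw [List.any_eq_true] at hinner ⊢
      obtain ⟨x, hx, hcond⟩ := hinner
      refine ⟨x, hx, ?_⟩
      rw [PySem.List.mem_pyRange_one] at hy hx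
      have hy1 : 1 ≤ y := hy.1
      have hyN : y < N + 1 := hy.2
      have hx1 : y + 1 ≤ x := hx.1
      have hxN : x < N + 1 := hx.2
      have hyn : y < (n : Int) := by omega
      have hxn : x < (n : Int) := by omega
      have hsq : 1 ≤ y.toNat ∧ y.toNat < n ∧ 1 ≤ x.toNat ∧ x.toNat < n := by omega
      have hne : x.toNat ≠ y.toNat := by omega
      -- the A condition
      have hget : pvMget ((PySem.List.pyRange 1 (N+1) 1).foldl (fun g i =>
            (PySem.List.pyRange 1 (N+1) 1).foldl (pvRowPass N i) g)
            (edges.foldl (fun g p => pvMset (pvMset g p.1 p.2 1) p.2 p.1 1)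
              (List.replicate n (List.replicate n 0)))) y x = M y.toNat x.toNat := by
        rw [pvMget_eq hrepF (by omega) hyn (by omega) hxn,
          pvNormIdx_of_nonneg (by omega), pvNormIdx_of_nonneg (by omega)]
      have hcondA : ((pvMget ((PySem.List.pyRange 1 (N+1) 1).foldl (fun g i =>
            (PySem.List.pyRange 1 (N+1) 1).foldl (pvRowPass N i) g)
            (edges.foldl (fun g p => pvMset (pvMset g p.1 p.2 1) p.2 p.1 1)
              (List.replicate n (List.replicate n 0)))) y x == 0 ||
          decide (pvMget ((PySem.List.pyRange 1 (N+1) 1).foldl (fun g i =>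
            (PySem.List.pyRange 1 (N+1) 1).foldl (pvRowPass N i) g)
            (edges.foldl (fun g p => pvMset (pvMset g p.1 p.2 1) p.2 p.1 1)
              (List.replicate n (List.replicate n 0)))) y x > 6)) = true) ↔
          ¬ ∃ L, L ≤ 6 ∧ pvW (pvE n edges) (n-1) L y.toNat x.toNat := by
        rw [hget]
        simp only [Bool.or_eq_true, beq_iff_eq, decide_eq_true_eq]
        rcases hdokF y.toNat x.toNat hsq.1 hsq.2.1 hsq.2.2.1 hsq.2.2.2 with
          ⟨h0, hnw⟩ | ⟨L, hM, hL1, hw, hmin⟩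
        · constructor
          · rintro _ ⟨L, _, hwL⟩
            exact hnw L hwL
          · intro _
            exact Or.inl h0
        · rw [hM]
          constructor
          · rintro (h | h) ⟨L', hL', hw'⟩
            · omega
            · have := hmin L' hw'
              have : (6 : Int) < L := h
              omega
          · intro hno
            by_cases h6 : L ≤ 6
            · exact absurd ⟨L, h6, hw⟩ hno
            · exact Or.inr (by exact_mod_cast (by omega : (6:Int) < (L:Int)))
      -- the B condition
      have hbseen := pvBfs_seen (n := n) hadj (s := y) hy1 hyn
      have hcondB : ((!(pvBget (pvBfsRounds 6
            (edges.foldl (fun ad p => pvAppendAt (pvAppendAt ad p.1 p.2) p.2 p.1)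
              (List.replicate n ([] : List Int)))
            (pvBset (pvBset (List.replicate n false) 0) y) [y]) x)) = true) ↔
          ¬ ∃ L, L ≤ 6 ∧ pvW (pvE n edges) (n-1) L y.toNat x.toNat := by
        rw [Bool.not_eq_eq_eq_not, Bool.not_true]
        rw [pvBget_eq hbseen ⟨by omega, hxn⟩]
        rw [pvNormIdx_of_nonneg (by omega)]
        have hiff := hbseen.2 x.toNat (by omega)
        constructor
        · intro hfalse hex
          obtain ⟨L, hL, hw⟩ := hex
          have : (pvBfsRounds 6 _ _ _).getD x.toNat false = true :=
            hiff.mpr (Or.inr (Or.inr ⟨L, hL, hw⟩))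
          rw [this] at hfalse
          exact absurd hfalse (by simp)
        · intro hno
          by_cases hval : (pvBfsRounds 6
              (edges.foldl (fun ad p => pvAppendAt (pvAppendAt ad p.1 p.2) p.2 p.1)
                (List.replicate n ([] : List Int)))
              (pvBset (pvBset (List.replicate n false) 0) y) [y]).getD x.toNat false = true
          · exfalso
            rcases hiff.mp hval with h | h
            · omega
            · rcases h with h | ⟨L, hL, hw⟩
              · exact hne h
              · exact hno ⟨L, hL, hw⟩
          · simpa using hval
      first
        | exact hcondB.mpr (hcondA.mp hcond)
        | exact hcondA.mpr (hcondB.mp hcond)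


-- ===== VERDICT (by name: the statement is the Claim_ definition above) =====
theorem solution_spec : Claim_equal_solution := by
  intro N K edges hdom hpre
  unfold Spec_solution
  exact solution_eq N K edges hpre
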